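-- pv_equiv track=rewrite | github.com/jjc999/Flight_Scraper | Original_GoogleFlightsScrape/ExpediaFlights.py | build_month_start_ind
-- ===== SOURCE A (Python) =====
-- def build_month_start_ind(start_month, end_month):
--     month_start_ind = [0]
--     for ind, month in enumerate(range(start_month, end_month)):
--         month = month % 12
--         if month == 0 or month == 2 or month == 4 or month == 6 or month == 7 or month == 9 or month == 11:
--             month_start_ind.append(month_start_ind[ind] + 31)
--         elif month == 1:
--             month_start_ind.append(month_start_ind[ind] + 29)
--         elif month == 3 or month == 5 or month == 8 or month == 10:
--             month_start_ind.append(month_start_ind[ind] + 30)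
--
--     return month_start_ind
-- ===== SOURCE B (Python) =====
-- # Closed-form: cumulative month-length table; each entry computed directly, no running accumulator.
-- CUM = [0, 31, 60, 91, 121, 152, 182, 213, 244, 274, 305, 335]
--
-- def _days_before(m):
--     # total days in months 0..m-1 of the repeating 366-day (leap) year cycle
--     return 366 * (m // 12) + CUM[m % 12]
--
-- def build_month_start_ind(start_month, end_month):
--     n = max(end_month - start_month, 0)
--     base = _days_before(start_month)
--     return [_days_before(start_month + k) - base for k in range(n + 1)]
-- ===== Notes on version B (the rewrite author's own statement) =====
-- stated objective: alternative
-- what changed: Replaced the accumulator loop with a seven-way branch chain by a closed-form cumulative month-length table: each prefix entry is computed directly as days_before(start+k) - days_before(start) with days_before(m) = 366*(m//12) + CUM[m%12].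
import Mathlib
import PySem

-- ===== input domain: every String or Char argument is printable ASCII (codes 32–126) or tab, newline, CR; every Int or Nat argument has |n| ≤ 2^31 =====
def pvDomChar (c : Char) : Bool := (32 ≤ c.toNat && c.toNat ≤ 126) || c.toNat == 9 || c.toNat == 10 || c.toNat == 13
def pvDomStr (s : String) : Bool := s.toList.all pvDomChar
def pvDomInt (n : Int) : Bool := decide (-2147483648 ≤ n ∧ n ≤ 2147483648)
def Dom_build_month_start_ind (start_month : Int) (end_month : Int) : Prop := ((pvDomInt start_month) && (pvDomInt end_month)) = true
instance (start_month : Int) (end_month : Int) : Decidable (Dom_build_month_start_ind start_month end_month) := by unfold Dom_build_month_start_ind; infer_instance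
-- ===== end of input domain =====

-- B replaces A's accumulator loop (branch chain adding each month's length) by a closed-form
-- cumulative-table formula; equivalence of the return values is proved on the whole domain.

-- ===== PORT A =====
-- loop body of A (the if/elif chain appending month_start_ind[ind] + days)
def pvStepA (acc : List Int) (p : Int × Int) : List Int :=
  let ind := p.1
  let month := PySem.Int.mod p.2 12
  if month = 0 ∨ month = 2 ∨ month = 4 ∨ month = 6 ∨ month = 7 ∨ month = 9 ∨ month = 11 then
    acc ++ [PySem.List.pyGetD acc ind 0 + 31]
  else if month = 1 then
    acc ++ [PySem.List.pyGetD acc ind 0 + 29]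
  else if month = 3 ∨ month = 5 ∨ month = 8 ∨ month = 10 then
    acc ++ [PySem.List.pyGetD acc ind 0 + 30]
  else acc

def build_month_start_ind (start_month : Int) (end_month : Int) : List Int :=
  (PySem.List.enumerate (PySem.List.pyRange start_month end_month 1) 0).foldl pvStepA [0]

-- ===== PORT B =====
def pvCUM : List Int := [0, 31, 60, 91, 121, 152, 182, 213, 244, 274, 305, 335]

def pvDaysBefore (m : Int) : Int :=
  366 * PySem.Int.floordiv m 12 + PySem.List.pyGetD pvCUM (PySem.Int.mod m 12) 0

def build_month_start_ind_alt (start_month : Int) (end_month : Int) : List Int :=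
  let n := max (end_month - start_month) 0
  (PySem.List.pyRange 0 (n + 1) 1).map
    (fun k => pvDaysBefore (start_month + k) - pvDaysBefore start_month)

-- ===== PRECONDITION & SPEC =====
def Spec_build_month_start_ind (start_month : Int) (end_month : Int) (out : List Int) : Prop := out = build_month_start_ind_alt start_month end_month
instance (start_month : Int) (end_month : Int) (out : List Int) : Decidable (Spec_build_month_start_ind start_month end_month out) := by unfold Spec_build_month_start_ind; infer_instance

-- ===== CLAIM (what is proved, stated in full; the proofs are below) =====
def Claim_equal_build_month_start_ind : Prop := ∀ (start_month : Int) (end_month : Int), Dom_build_month_start_ind start_month end_month → Spec_build_month_start_ind start_month end_month (build_month_start_ind start_month end_month)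

-- ===== LEMMAS AND PROOFS =====

lemma pvStepA_eq (acc : List Int) (ind m : Int) :
    pvStepA acc (ind, m)
      = acc ++ [PySem.List.pyGetD acc ind 0 + (pvDaysBefore (m + 1) - pvDaysBefore m)] := by
  have h12 : (0:Int) < 12 := by norm_num
  unfold pvStepA pvDaysBefore
  simp only [PySem.Int.mod_eq_emod_of_pos h12, PySem.Int.floordiv_eq_ediv_of_pos h12]
  have h0 : 0 ≤ m % 12 := Int.emod_nonneg m (by norm_num)
  have h1 : m % 12 < 12 := Int.emod_lt_of_pos m h12
  interval_cases h : m % 12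
  · have e1 : (m + 1) % 12 = 1 := by omega
    have e2 : (m + 1) / 12 = m / 12 := by omega
    rw [e1, e2]
    norm_num [pvCUM, PySem.List.pyGetD, PySem.List.pyGet?, PySem.List.pyIdx?, show Int.toNat 0 = 0 from rfl, show Int.toNat 1 = 1 from rfl]
    try omega
  · have e1 : (m + 1) % 12 = 2 := by omega
    have e2 : (m + 1) / 12 = m / 12 := by omega
    rw [e1, e2]
    norm_num [pvCUM, PySem.List.pyGetD, PySem.List.pyGet?, PySem.List.pyIdx?, show Int.toNat 1 = 1 from rfl, show Int.toNat 2 = 2 from rfl]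
    try omega
  · have e1 : (m + 1) % 12 = 3 := by omega
    have e2 : (m + 1) / 12 = m / 12 := by omega
    rw [e1, e2]
    norm_num [pvCUM, PySem.List.pyGetD, PySem.List.pyGet?, PySem.List.pyIdx?, show Int.toNat 2 = 2 from rfl, show Int.toNat 3 = 3 from rfl]
    try omega
  · have e1 : (m + 1) % 12 = 4 := by omega
    have e2 : (m + 1) / 12 = m / 12 := by omega
    rw [e1, e2]
    norm_num [pvCUM, PySem.List.pyGetD, PySem.List.pyGet?, PySem.List.pyIdx?, show Int.toNat 3 = 3 from rfl, show Int.toNat 4 = 4 from rfl]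
    try omega
  · have e1 : (m + 1) % 12 = 5 := by omega
    have e2 : (m + 1) / 12 = m / 12 := by omega
    rw [e1, e2]
    norm_num [pvCUM, PySem.List.pyGetD, PySem.List.pyGet?, PySem.List.pyIdx?, show Int.toNat 4 = 4 from rfl, show Int.toNat 5 = 5 from rfl]
    try omega
  · have e1 : (m + 1) % 12 = 6 := by omega
    have e2 : (m + 1) / 12 = m / 12 := by omega
    rw [e1, e2]
    norm_num [pvCUM, PySem.List.pyGetD, PySem.List.pyGet?, PySem.List.pyIdx?, show Int.toNat 5 = 5 from rfl, show Int.toNat 6 = 6 from rfl]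
    try omega
  · have e1 : (m + 1) % 12 = 7 := by omega
    have e2 : (m + 1) / 12 = m / 12 := by omega
    rw [e1, e2]
    norm_num [pvCUM, PySem.List.pyGetD, PySem.List.pyGet?, PySem.List.pyIdx?, show Int.toNat 6 = 6 from rfl, show Int.toNat 7 = 7 from rfl]
    try omega
  · have e1 : (m + 1) % 12 = 8 := by omega
    have e2 : (m + 1) / 12 = m / 12 := by omega
    rw [e1, e2]
    norm_num [pvCUM, PySem.List.pyGetD, PySem.List.pyGet?, PySem.List.pyIdx?, show Int.toNat 7 = 7 from rfl, show Int.toNat 8 = 8 from rfl]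
    try omega
  · have e1 : (m + 1) % 12 = 9 := by omega
    have e2 : (m + 1) / 12 = m / 12 := by omega
    rw [e1, e2]
    norm_num [pvCUM, PySem.List.pyGetD, PySem.List.pyGet?, PySem.List.pyIdx?, show Int.toNat 8 = 8 from rfl, show Int.toNat 9 = 9 from rfl]
    try omega
  · have e1 : (m + 1) % 12 = 10 := by omega
    have e2 : (m + 1) / 12 = m / 12 := by omega
    rw [e1, e2]
    norm_num [pvCUM, PySem.List.pyGetD, PySem.List.pyGet?, PySem.List.pyIdx?, show Int.toNat 9 = 9 from rfl, show Int.toNat 10 = 10 from rfl]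
    try omega
  · have e1 : (m + 1) % 12 = 11 := by omega
    have e2 : (m + 1) / 12 = m / 12 := by omega
    rw [e1, e2]
    norm_num [pvCUM, PySem.List.pyGetD, PySem.List.pyGet?, PySem.List.pyIdx?, show Int.toNat 10 = 10 from rfl, show Int.toNat 11 = 11 from rfl]
    try omega
  · have e1 : (m + 1) % 12 = 0 := by omega
    have e2 : (m + 1) / 12 = m / 12 + 1 := by omega
    rw [e1, e2]
    norm_num [pvCUM, PySem.List.pyGetD, PySem.List.pyGet?, PySem.List.pyIdx?, show Int.toNat 11 = 11 from rfl, show Int.toNat 0 = 0 from rfl]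
    try omega

lemma mainA (n : Nat) (s : Int) :
    build_month_start_ind s (s + n)
      = (List.range (n + 1)).map (fun k : Nat => pvDaysBefore (s + k) - pvDaysBefore s) := by
  induction n with
  | zero =>
    simp [build_month_start_ind, PySem.List.pyRange_one_eq_nil (le_refl s)]
  | succ n ih =>
    have hc : ((n + 1 : Nat) : Int) = (n : Int) + 1 := by push_cast; ring
    have hs : s ≤ s + (n : Int) := by omega
    have hr : PySem.List.pyRange s (s + ((n : Int) + 1)) 1
        = PySem.List.pyRange s (s + n) 1 ++ [s + n] := by
      have h := PySem.List.pyRange_one_succ_right (a := s) (b := s + (n : Int)) hs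
      rw [show s + ((n : Int) + 1) = s + (n : Int) + 1 by ring]
      exact h
    have hlen : (PySem.List.pyRange s (s + (n : Int)) 1).length = n := by
      rw [PySem.List.length_pyRange_one]; omega
    unfold build_month_start_ind
    rw [hc, hr, PySem.List.enumerate_append, List.foldl_append]
    have hfold : (PySem.List.enumerate (PySem.List.pyRange s (s + (n : Int)) 1) 0).foldl pvStepA [0]
        = (List.range (n + 1)).map (fun k : Nat => pvDaysBefore (s + k) - pvDaysBefore s) := by
      have h := ih
      unfold build_month_start_ind at h
      exact h
    rw [hfold, hlen]
    simp only [PySem.List.enumerate, List.foldl_cons, List.foldl_nil]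
    rw [show ((0 : Int) + (n : Nat)) = ((n : Nat) : Int) by ring]
    rw [pvStepA_eq]
    have hget : PySem.List.pyGetD
        ((List.range (n + 1)).map (fun k : Nat => pvDaysBefore (s + k) - pvDaysBefore s)) ((n : Nat) : Int) 0
        = pvDaysBefore (s + n) - pvDaysBefore s := by
      rw [PySem.List.pyGetD_natCast]
      simp [List.getD]
    rw [hget]
    conv_rhs => rw [List.range_succ, List.map_append]
    congr 1
    simp only [List.map_cons, List.map_nil]
    rw [hc]
    ring_nf

-- ===== VERDICT (by name: the statement is the Claim_ definition above) =====
lemma altB (s e : Int) :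
    build_month_start_ind_alt s e
      = (List.range ((max (e - s) 0).toNat + 1)).map
          (fun k : Nat => pvDaysBefore (s + k) - pvDaysBefore s) := by
  unfold build_month_start_ind_alt
  dsimp only
  rw [PySem.List.pyRange_one, List.map_map,
    show ((max (e - s) 0 + 1 - 0).toNat) = (max (e - s) 0).toNat + 1 by omega]
  refine List.map_congr_left ?_
  intro k _
  simp [Function.comp]

theorem build_month_start_ind_spec : Claim_equal_build_month_start_ind := by
  intro s e _
  unfold Spec_build_month_start_ind
  rw [altB]
  by_cases he : e ≤ s
  · rw [show max (e - s) 0 = 0 by omega]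
    unfold build_month_start_ind
    rw [PySem.List.pyRange_one_eq_nil he]
    simp [PySem.List.enumerate]
  · rw [show (max (e - s) 0).toNat = (e - s).toNat by omega]
    conv_lhs => rw [show e = s + ((e - s).toNat : Int) by omega]
    exact mainA (e - s).toNat s
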